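-- pv_equiv track=rewrite | github.com/mauvedeity/adventofcode | 2025/day02/day02.py | validate2
-- ===== SOURCE A (Python) =====
-- def validate2(intid):
--     valid = True
--     strid = str(intid)
--     slen = len(strid)
--     hslen = int(slen/2)
--     for seg in range(1, hslen+1):
--         sseg = strid[0:seg]
--         for lens in range(1, 10):
--             tstr = sseg*lens
--             if(tstr == strid):
--                 return(False)
--     return(valid)
-- ===== SOURCE B (Python) =====
-- def validate2(intid):
--     # single divisor-style pass over copy counts k=2..9 instead of A's nested prefix-length x copy-count scan
--     strid = str(intid)
--     n = len(strid)
--     for k in range(2, 10):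
--         if n % k == 0 and strid[:n // k] * k == strid:
--             return False
--     return True
-- ===== Notes on version B (the rewrite author's own statement) =====
-- stated objective: simpler
-- what changed: Instead of trying every prefix length up to half the string and every copy count (rebuilding a candidate string for each pair), B loops only over the eight admissible copy counts, checks divisibility of the length, and compares prefix times count once per count.
import Mathlib
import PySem

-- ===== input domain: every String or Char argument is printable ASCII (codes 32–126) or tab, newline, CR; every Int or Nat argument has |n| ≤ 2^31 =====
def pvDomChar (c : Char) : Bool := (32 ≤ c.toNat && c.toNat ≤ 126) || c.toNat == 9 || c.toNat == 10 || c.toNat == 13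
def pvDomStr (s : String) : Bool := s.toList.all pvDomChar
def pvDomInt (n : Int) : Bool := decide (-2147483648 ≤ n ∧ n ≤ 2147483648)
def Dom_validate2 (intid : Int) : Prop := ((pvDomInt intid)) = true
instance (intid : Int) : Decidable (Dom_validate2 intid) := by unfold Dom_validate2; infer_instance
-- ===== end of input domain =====

-- B replaces A's nested prefix-length × copy-count scan with a single loop over the admissible copy counts (objective: simpler).

-- ===== PORT A =====
-- Python's early 'return False' inside the nested for-loops is ported as List.any over the same ranges.
def validate2 (intid : Int) : Bool :=
  let valid := true
  let strid := PySem.Int.toChars intid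
  let slen : Int := strid.length
  let hslen : Int := PySem.Int.floordiv slen 2  -- int(slen/2): slen ≥ 0 and ≤ 11, so the float division is exact and int() floors
  if (PySem.List.pyRange 1 (hslen + 1) 1).any (fun seg =>
       let sseg := PySem.List.slice strid (some 0) (some seg)
       (PySem.List.pyRange 1 10 1).any (fun lens =>
         let tstr := PySem.List.pyRepeat sseg lens
         tstr == strid))
  then false else valid

-- ===== PORT B =====
def validate2_alt (intid : Int) : Bool :=
  let strid := PySem.Int.toChars intid
  let n : Int := strid.length
  !((PySem.List.pyRange 2 10 1).any (fun k =>
      (PySem.Int.mod n k == 0) &&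
      (PySem.List.pyRepeat (PySem.List.slice strid none (some (PySem.Int.floordiv n k))) k == strid)))

-- ===== PRECONDITION & SPEC =====
def Spec_validate2 (intid : Int) (out : Bool) : Prop := out = validate2_alt intid
instance (intid : Int) (out : Bool) : Decidable (Spec_validate2 intid out) := by unfold Spec_validate2; infer_instance

-- ===== CLAIM (what is proved, stated in full; the proofs are below) =====
def Claim_equal_validate2 : Prop := ∀ (intid : Int), Dom_validate2 intid → Spec_validate2 intid (validate2 intid)

-- ===== LEMMAS AND PROOFS =====

theorem toDigitsCore_ne_nil (b : ℕ) : ∀ (f n : ℕ) (l : List Char), l ≠ [] → Nat.toDigitsCore b f n l ≠ [] := by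
  intro f
  induction f with
  | zero => intro n l h; simpa [Nat.toDigitsCore]
  | succ f ih =>
    intro n l h
    simp only [Nat.toDigitsCore]
    split
    · exact List.cons_ne_nil _ _
    · exact ih _ _ (List.cons_ne_nil _ _)

theorem toChars_ne_nil (n : Int) : PySem.Int.toChars n ≠ [] := by
  unfold PySem.Int.toChars
  split
  · simp
  · show Nat.toDigitsCore 10 _ _ [] ≠ []
    simp only [Nat.toDigitsCore]
    split
    · exact List.cons_ne_nil _ _
    · exact toDigitsCore_ne_nil 10 _ _ _ (List.cons_ne_nil _ _)

theorem length_pyRepeat (xs : List Char) (k : Int) :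
    (PySem.List.pyRepeat xs k).length = k.toNat * xs.length := by
  simp [PySem.List.pyRepeat]

theorem fd_cast (a b : ℕ) : PySem.Int.floordiv (a:ℤ) (b:ℤ) = ((a/b : ℕ):ℤ) := by
  simp [PySem.Int.floordiv, Int.fdiv_eq_ediv]

theorem fd2 (a : ℕ) : PySem.Int.floordiv (a:ℤ) 2 = ((a/2 : ℕ):ℤ) := by
  have h : ((2:ℕ):ℤ) = (2:ℤ) := rfl
  rw [← h, fd_cast]

theorem md_cast (a b : ℕ) : PySem.Int.mod (a:ℤ) (b:ℤ) = ((a % b : ℕ):ℤ) := by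
  simp [PySem.Int.mod, Int.fmod_eq_emod_of_nonneg _ (by positivity : (0:ℤ) ≤ (b:ℤ))]

-- The combinatorial core: over a nonempty list, A's nested scan finds a match iff B's divisor loop does.
theorem key (l : List Char) (hl : l ≠ []) :
    ((PySem.List.pyRange 1 (PySem.Int.floordiv (l.length : Int) 2 + 1) 1).any (fun seg =>
       (PySem.List.pyRange 1 10 1).any (fun lens =>
         PySem.List.pyRepeat (PySem.List.slice l (some 0) (some seg)) lens == l)))
    = ((PySem.List.pyRange 2 10 1).any (fun k =>
       (PySem.Int.mod (l.length : Int) k == 0) &&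
       (PySem.List.pyRepeat (PySem.List.slice l none (some (PySem.Int.floordiv (l.length : Int) k))) k == l))) := by
  have hn : 0 < l.length := List.length_pos_of_ne_nil hl
  rw [Bool.eq_iff_iff]
  simp only [List.any_eq_true, PySem.List.mem_pyRange_one, beq_iff_eq, Bool.and_eq_true, fd2]
  constructor
  · rintro ⟨seg, ⟨h1, h2⟩, lens, ⟨h3, h4⟩, heq⟩
    obtain ⟨s, rfl⟩ : ∃ s : ℕ, seg = (s:ℤ) := ⟨seg.toNat, (Int.toNat_of_nonneg (by omega)).symm⟩
    obtain ⟨j, rfl⟩ : ∃ j : ℕ, lens = (j:ℤ) := ⟨lens.toNat, (Int.toNat_of_nonneg (by omega)).symm⟩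
    rw [PySem.List.slice_zero_start, PySem.List.slice_to_natCast] at heq
    have hs2 : s ≤ l.length / 2 := by exact_mod_cast (by omega : (s:ℤ) ≤ ((l.length/2 : ℕ):ℤ))
    have hslen : s ≤ l.length := le_trans hs2 (Nat.div_le_self _ _)
    have hlen : j * s = l.length := by
      have := congrArg List.length heq
      simpa [length_pyRepeat, Nat.min_eq_left hslen] using this
    have hj1 : 1 ≤ j := by exact_mod_cast h3
    have hj9 : j < 10 := by exact_mod_cast h4
    have hj2 : 2 ≤ j := by
      rcases Nat.lt_or_ge j 2 with h | h
      · interval_cases j <;> omega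
      · exact h
    refine ⟨(j:ℤ), ⟨by exact_mod_cast hj2, by exact_mod_cast hj9⟩, ?_, ?_⟩
    · rw [md_cast]
      have : l.length % j = 0 := by rw [← hlen]; exact Nat.mul_mod_right j s
      simp [this]
    · have hjs : l.length / j = s := by rw [← hlen]; exact Nat.mul_div_cancel_left s (by omega)
      rw [fd_cast, hjs, PySem.List.slice_to_natCast]
      exact heq
  · rintro ⟨k, ⟨h1, h2⟩, hmod, hrep⟩
    obtain ⟨j, rfl⟩ : ∃ j : ℕ, k = (j:ℤ) := ⟨k.toNat, (Int.toNat_of_nonneg (by omega)).symm⟩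
    have hj2 : 2 ≤ j := by exact_mod_cast h1
    have hj9 : j < 10 := by exact_mod_cast h2
    rw [md_cast] at hmod
    have hmodn : l.length % j = 0 := by exact_mod_cast hmod
    have hdvd : j ∣ l.length := Nat.dvd_of_mod_eq_zero hmodn
    have hjle : j ≤ l.length := Nat.le_of_dvd hn hdvd
    have hs1 : 1 ≤ l.length / j := (Nat.one_le_div_iff (by omega)).mpr hjle
    have hs2 : l.length / j ≤ l.length / 2 := Nat.div_le_div_left hj2 (by omega)
    rw [fd_cast, PySem.List.slice_to_natCast] at hrep
    refine ⟨((l.length / j : ℕ) : ℤ), ⟨by exact_mod_cast hs1, by exact_mod_cast (by omega : ((l.length/j : ℕ):ℤ) < ((l.length/2 : ℕ):ℤ) + 1)⟩,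
      (j:ℤ), ⟨by exact_mod_cast (by omega : 1 ≤ j), by exact_mod_cast hj9⟩, ?_⟩
    rw [PySem.List.slice_zero_start, PySem.List.slice_to_natCast]
    exact hrep

-- ===== VERDICT (by name: the statement is the Claim_ definition above) =====
theorem validate2_spec : Claim_equal_validate2 := by
  intro intid _
  unfold Spec_validate2 validate2 validate2_alt
  simp only []
  rw [key _ (toChars_ne_nil intid)]
  cases h : (PySem.List.pyRange 2 10 1).any _ <;> simp
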